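-- pv_equiv track=rewrite | github.com/LackOfSkillz/DireEngine | world/systems/warrior/progression.py | get_warrior_abilities_for_circle
-- ===== SOURCE A (Python) =====
-- WARRIOR_UNLOCKS = {
--     5: ["surge"],
--     10: ["intimidate"],
--     15: ["rally"],
--     20: ["crush"],
--     25: ["press"],
--     30: ["sweep"],
--     35: ["secondwind"],
--     40: ["whirl"],
--     45: ["hold"],
--     50: ["frenzy"],
-- }
--
-- def get_warrior_abilities_for_circle(circle):
--     circle = max(1, int(circle or 1))
--     abilities = []
--     for unlock_circle in sorted(WARRIOR_UNLOCKS):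
--         if unlock_circle > circle:
--             continue
--         abilities.extend(WARRIOR_UNLOCKS[unlock_circle])
--     return abilities
-- ===== SOURCE B (Python) =====
-- WARRIOR_UNLOCKS = {
--     5: ["surge"],
--     10: ["intimidate"],
--     15: ["rally"],
--     20: ["crush"],
--     25: ["press"],
--     30: ["sweep"],
--     35: ["secondwind"],
--     40: ["whirl"],
--     45: ["hold"],
--     50: ["frenzy"],
-- }
--
-- # Precomputed once at module scope: sorted unlock circles, the abilities
-- # flattened in that order, and cumulative ability counts per prefix of keys.
-- _KEYS = sorted(WARRIOR_UNLOCKS)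
-- _FLAT = [a for k in _KEYS for a in WARRIOR_UNLOCKS[k]]
-- _CUM = [0]
-- for _k in _KEYS:
--     _CUM.append(_CUM[-1] + len(WARRIOR_UNLOCKS[_k]))
--
-- def get_warrior_abilities_for_circle(circle):
--     circle = max(1, int(circle or 1))
--     # binary search: number of keys <= circle (bisect_right by hand, no imports)
--     lo, hi = 0, len(_KEYS)
--     while lo < hi:
--         mid = (lo + hi) // 2
--         if _KEYS[mid] <= circle:
--             lo = mid + 1
--         else:
--             hi = mid
--     return _FLAT[:_CUM[lo]]
-- ===== Notes on version B (the rewrite author's own statement) =====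
-- stated objective: alternative
-- what changed: Replaces the per-call scan over the sorted dict keys (filter + extend) with module-scope precomputation of sorted keys, a flattened ability list and cumulative counts, so each call is a hand-written binary search (bisect_right) plus one slice.
import Mathlib
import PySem

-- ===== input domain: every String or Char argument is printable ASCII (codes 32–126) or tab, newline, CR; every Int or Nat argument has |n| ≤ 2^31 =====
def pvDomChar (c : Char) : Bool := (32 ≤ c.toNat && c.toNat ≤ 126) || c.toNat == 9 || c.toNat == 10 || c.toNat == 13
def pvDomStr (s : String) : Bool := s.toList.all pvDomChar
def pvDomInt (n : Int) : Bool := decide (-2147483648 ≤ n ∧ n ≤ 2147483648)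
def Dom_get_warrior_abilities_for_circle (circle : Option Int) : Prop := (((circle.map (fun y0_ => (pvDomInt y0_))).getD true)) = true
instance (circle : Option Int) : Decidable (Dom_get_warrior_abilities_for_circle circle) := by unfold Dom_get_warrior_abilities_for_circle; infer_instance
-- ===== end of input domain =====

-- B is an alternative implementation: module-level precomputed sorted keys / flattened
-- abilities / cumulative counts, with a per-call hand-written binary search plus one slice.

-- ===== PORT A =====
def WARRIOR_UNLOCKS : PySem.Dict Int (List String) := PySem.Dict.ofList
  [(5, ["surge"]), (10, ["intimidate"]), (15, ["rally"]), (20, ["crush"]), (25, ["press"]),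
   (30, ["sweep"]), (35, ["secondwind"]), (40, ["whirl"]), (45, ["hold"]), (50, ["frenzy"])]

def get_warrior_abilities_for_circle (circle : Option Int) : List String :=
  -- circle = max(1, int(circle or 1))
  let c : Int := max 1 (match circle with | none => 1 | some v => if v = 0 then 1 else v)
  -- for unlock_circle in sorted(WARRIOR_UNLOCKS): if > circle: continue; abilities.extend(...)
  -- WARRIOR_UNLOCKS[unlock_circle] cannot raise (keys come from the dict), so getD is exact here
  (PySem.List.sorted WARRIOR_UNLOCKS.keys (fun x => x) false).foldl
    (fun abilities unlock_circle =>
      if unlock_circle > c then abilities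
      else abilities ++ WARRIOR_UNLOCKS.getD unlock_circle [])
    []

-- ===== PORT B =====
-- _KEYS = sorted(WARRIOR_UNLOCKS)
def altKEYS : List Int := PySem.List.sorted WARRIOR_UNLOCKS.keys (fun x => x) false
-- _FLAT = [a for k in _KEYS for a in WARRIOR_UNLOCKS[k]]   (keys come from the dict: getD exact)
def altFLAT : List String := altKEYS.flatMap (fun k => WARRIOR_UNLOCKS.getD k [])
-- _CUM built by the module-level loop (cumulative ability counts); _CUM[-1] is getLastD
def altCUM : List Int := altKEYS.foldl
  (fun cum k => cum ++ [cum.getLastD 0 + ((WARRIOR_UNLOCKS.getD k []).length : Int)]) [0]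

-- the while-loop of B (bisect_right by hand); _KEYS[mid] in range since lo < hi ≤ len, so getD is exact
def bsLoop (c : Int) (lo hi : Nat) : Nat :=
  if lo < hi then
    let mid := (lo + hi) / 2
    if altKEYS.getD mid 0 ≤ c then bsLoop c (mid + 1) hi else bsLoop c lo mid
  else lo
termination_by hi - lo
decreasing_by all_goals omega

def get_warrior_abilities_for_circle_alt (circle : Option Int) : List String :=
  let c : Int := max 1 (match circle with | none => 1 | some v => if v = 0 then 1 else v)
  let lo := bsLoop c 0 altKEYS.length
  -- _FLAT[:_CUM[lo]]
  PySem.List.slice altFLAT none (some (altCUM.getD lo 0))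

-- ===== PRECONDITION & SPEC =====
def Spec_get_warrior_abilities_for_circle (circle : Option Int) (out : List String) : Prop := out = get_warrior_abilities_for_circle_alt circle
instance (circle : Option Int) (out : List String) : Decidable (Spec_get_warrior_abilities_for_circle circle out) := by unfold Spec_get_warrior_abilities_for_circle; infer_instance

-- ===== CLAIM (what is proved, stated in full; the proofs are below) =====
def Claim_equal_get_warrior_abilities_for_circle : Prop := ∀ (circle : Option Int), Dom_get_warrior_abilities_for_circle circle → Spec_get_warrior_abilities_for_circle circle (get_warrior_abilities_for_circle circle)

-- ===== LEMMAS AND PROOFS =====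

lemma hS : PySem.List.sorted WARRIOR_UNLOCKS.keys (fun x => x) false = [5, 10, 15, 20, 25, 30, 35, 40, 45, 50] := by decide

lemma hF : altFLAT = ["surge", "intimidate", "rally", "crush", "press", "sweep", "secondwind", "whirl", "hold", "frenzy"] := by decide

lemma hC : altCUM = [0, 1, 2, 3, 4, 5, 6, 7, 8, 9, 10] := by decide

lemma hK : altKEYS = [5, 10, 15, 20, 25, 30, 35, 40, 45, 50] := by decide

lemma core (c : Int) :
    (PySem.List.sorted WARRIOR_UNLOCKS.keys (fun x => x) false).foldl
      (fun abilities unlock_circle =>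
        if unlock_circle > c then abilities
        else abilities ++ WARRIOR_UNLOCKS.getD unlock_circle []) []
    = PySem.List.slice altFLAT none (some (altCUM.getD (bsLoop c 0 altKEYS.length) 0)) := by
  have h : c < 5 ∨ (5 ≤ c ∧ c < 10) ∨ (10 ≤ c ∧ c < 15) ∨ (15 ≤ c ∧ c < 20) ∨ (20 ≤ c ∧ c < 25) ∨ (25 ≤ c ∧ c < 30) ∨ (30 ≤ c ∧ c < 35) ∨ (35 ≤ c ∧ c < 40) ∨ (40 ≤ c ∧ c < 45) ∨ (45 ≤ c ∧ c < 50) ∨ 50 ≤ c := by omega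
  rcases h with h|h|h|h|h|h|h|h|h|h|h
  · simp [bsLoop, hK, hS, hF, hC, PySem.List.slice, PySem.List.clampIdx, show (5:Int) > c from by omega, show ¬((5:Int) ≤ c) from by omega, show (10:Int) > c from by omega, show ¬((10:Int) ≤ c) from by omega, show (15:Int) > c from by omega, show ¬((15:Int) ≤ c) from by omega, show (20:Int) > c from by omega, show ¬((20:Int) ≤ c) from by omega, show (25:Int) > c from by omega, show ¬((25:Int) ≤ c) from by omega, show (30:Int) > c from by omega, show ¬((30:Int) ≤ c) from by omega, show (35:Int) > c from by omega, show ¬((35:Int) ≤ c) from by omega, show (40:Int) > c from by omega, show ¬((40:Int) ≤ c) from by omega, show (45:Int) > c from by omega, show ¬((45:Int) ≤ c) from by omega, show (50:Int) > c from by omega, show ¬((50:Int) ≤ c) from by omega] <;> try rfl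
  · simp [bsLoop, hK, hS, hF, hC, PySem.List.slice, PySem.List.clampIdx, show ¬((5:Int) > c) from by omega, show (5:Int) ≤ c from by omega, show (10:Int) > c from by omega, show ¬((10:Int) ≤ c) from by omega, show (15:Int) > c from by omega, show ¬((15:Int) ≤ c) from by omega, show (20:Int) > c from by omega, show ¬((20:Int) ≤ c) from by omega, show (25:Int) > c from by omega, show ¬((25:Int) ≤ c) from by omega, show (30:Int) > c from by omega, show ¬((30:Int) ≤ c) from by omega, show (35:Int) > c from by omega, show ¬((35:Int) ≤ c) from by omega, show (40:Int) > c from by omega, show ¬((40:Int) ≤ c) from by omega, show (45:Int) > c from by omega, show ¬((45:Int) ≤ c) from by omega, show (50:Int) > c from by omega, show ¬((50:Int) ≤ c) from by omega] <;> try rfl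
  · simp [bsLoop, hK, hS, hF, hC, PySem.List.slice, PySem.List.clampIdx, show ¬((5:Int) > c) from by omega, show (5:Int) ≤ c from by omega, show ¬((10:Int) > c) from by omega, show (10:Int) ≤ c from by omega, show (15:Int) > c from by omega, show ¬((15:Int) ≤ c) from by omega, show (20:Int) > c from by omega, show ¬((20:Int) ≤ c) from by omega, show (25:Int) > c from by omega, show ¬((25:Int) ≤ c) from by omega, show (30:Int) > c from by omega, show ¬((30:Int) ≤ c) from by omega, show (35:Int) > c from by omega, show ¬((35:Int) ≤ c) from by omega, show (40:Int) > c from by omega, show ¬((40:Int) ≤ c) from by omega, show (45:Int) > c from by omega, show ¬((45:Int) ≤ c) from by omega, show (50:Int) > c from by omega, show ¬((50:Int) ≤ c) from by omega] <;> try rfl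
  · simp [bsLoop, hK, hS, hF, hC, PySem.List.slice, PySem.List.clampIdx, show ¬((5:Int) > c) from by omega, show (5:Int) ≤ c from by omega, show ¬((10:Int) > c) from by omega, show (10:Int) ≤ c from by omega, show ¬((15:Int) > c) from by omega, show (15:Int) ≤ c from by omega, show (20:Int) > c from by omega, show ¬((20:Int) ≤ c) from by omega, show (25:Int) > c from by omega, show ¬((25:Int) ≤ c) from by omega, show (30:Int) > c from by omega, show ¬((30:Int) ≤ c) from by omega, show (35:Int) > c from by omega, show ¬((35:Int) ≤ c) from by omega, show (40:Int) > c from by omega, show ¬((40:Int) ≤ c) from by omega, show (45:Int) > c from by omega, show ¬((45:Int) ≤ c) from by omega, show (50:Int) > c from by omega, show ¬((50:Int) ≤ c) from by omega] <;> try rfl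
  · simp [bsLoop, hK, hS, hF, hC, PySem.List.slice, PySem.List.clampIdx, show ¬((5:Int) > c) from by omega, show (5:Int) ≤ c from by omega, show ¬((10:Int) > c) from by omega, show (10:Int) ≤ c from by omega, show ¬((15:Int) > c) from by omega, show (15:Int) ≤ c from by omega, show ¬((20:Int) > c) from by omega, show (20:Int) ≤ c from by omega, show (25:Int) > c from by omega, show ¬((25:Int) ≤ c) from by omega, show (30:Int) > c from by omega, show ¬((30:Int) ≤ c) from by omega, show (35:Int) > c from by omega, show ¬((35:Int) ≤ c) from by omega, show (40:Int) > c from by omega, show ¬((40:Int) ≤ c) from by omega, show (45:Int) > c from by omega, show ¬((45:Int) ≤ c) from by omega, show (50:Int) > c from by omega, show ¬((50:Int) ≤ c) from by omega] <;> try rfl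
  · simp [bsLoop, hK, hS, hF, hC, PySem.List.slice, PySem.List.clampIdx, show ¬((5:Int) > c) from by omega, show (5:Int) ≤ c from by omega, show ¬((10:Int) > c) from by omega, show (10:Int) ≤ c from by omega, show ¬((15:Int) > c) from by omega, show (15:Int) ≤ c from by omega, show ¬((20:Int) > c) from by omega, show (20:Int) ≤ c from by omega, show ¬((25:Int) > c) from by omega, show (25:Int) ≤ c from by omega, show (30:Int) > c from by omega, show ¬((30:Int) ≤ c) from by omega, show (35:Int) > c from by omega, show ¬((35:Int) ≤ c) from by omega, show (40:Int) > c from by omega, show ¬((40:Int) ≤ c) from by omega, show (45:Int) > c from by omega, show ¬((45:Int) ≤ c) from by omega, show (50:Int) > c from by omega, show ¬((50:Int) ≤ c) from by omega] <;> try rfl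
  · simp [bsLoop, hK, hS, hF, hC, PySem.List.slice, PySem.List.clampIdx, show ¬((5:Int) > c) from by omega, show (5:Int) ≤ c from by omega, show ¬((10:Int) > c) from by omega, show (10:Int) ≤ c from by omega, show ¬((15:Int) > c) from by omega, show (15:Int) ≤ c from by omega, show ¬((20:Int) > c) from by omega, show (20:Int) ≤ c from by omega, show ¬((25:Int) > c) from by omega, show (25:Int) ≤ c from by omega, show ¬((30:Int) > c) from by omega, show (30:Int) ≤ c from by omega, show (35:Int) > c from by omega, show ¬((35:Int) ≤ c) from by omega, show (40:Int) > c from by omega, show ¬((40:Int) ≤ c) from by omega, show (45:Int) > c from by omega, show ¬((45:Int) ≤ c) from by omega, show (50:Int) > c from by omega, show ¬((50:Int) ≤ c) from by omega] <;> try rfl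
  · simp [bsLoop, hK, hS, hF, hC, PySem.List.slice, PySem.List.clampIdx, show ¬((5:Int) > c) from by omega, show (5:Int) ≤ c from by omega, show ¬((10:Int) > c) from by omega, show (10:Int) ≤ c from by omega, show ¬((15:Int) > c) from by omega, show (15:Int) ≤ c from by omega, show ¬((20:Int) > c) from by omega, show (20:Int) ≤ c from by omega, show ¬((25:Int) > c) from by omega, show (25:Int) ≤ c from by omega, show ¬((30:Int) > c) from by omega, show (30:Int) ≤ c from by omega, show ¬((35:Int) > c) from by omega, show (35:Int) ≤ c from by omega, show (40:Int) > c from by omega, show ¬((40:Int) ≤ c) from by omega, show (45:Int) > c from by omega, show ¬((45:Int) ≤ c) from by omega, show (50:Int) > c from by omega, show ¬((50:Int) ≤ c) from by omega] <;> try rfl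
  · simp [bsLoop, hK, hS, hF, hC, PySem.List.slice, PySem.List.clampIdx, show ¬((5:Int) > c) from by omega, show (5:Int) ≤ c from by omega, show ¬((10:Int) > c) from by omega, show (10:Int) ≤ c from by omega, show ¬((15:Int) > c) from by omega, show (15:Int) ≤ c from by omega, show ¬((20:Int) > c) from by omega, show (20:Int) ≤ c from by omega, show ¬((25:Int) > c) from by omega, show (25:Int) ≤ c from by omega, show ¬((30:Int) > c) from by omega, show (30:Int) ≤ c from by omega, show ¬((35:Int) > c) from by omega, show (35:Int) ≤ c from by omega, show ¬((40:Int) > c) from by omega, show (40:Int) ≤ c from by omega, show (45:Int) > c from by omega, show ¬((45:Int) ≤ c) from by omega, show (50:Int) > c from by omega, show ¬((50:Int) ≤ c) from by omega] <;> try rfl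
  · simp [bsLoop, hK, hS, hF, hC, PySem.List.slice, PySem.List.clampIdx, show ¬((5:Int) > c) from by omega, show (5:Int) ≤ c from by omega, show ¬((10:Int) > c) from by omega, show (10:Int) ≤ c from by omega, show ¬((15:Int) > c) from by omega, show (15:Int) ≤ c from by omega, show ¬((20:Int) > c) from by omega, show (20:Int) ≤ c from by omega, show ¬((25:Int) > c) from by omega, show (25:Int) ≤ c from by omega, show ¬((30:Int) > c) from by omega, show (30:Int) ≤ c from by omega, show ¬((35:Int) > c) from by omega, show (35:Int) ≤ c from by omega, show ¬((40:Int) > c) from by omega, show (40:Int) ≤ c from by omega, show ¬((45:Int) > c) from by omega, show (45:Int) ≤ c from by omega, show (50:Int) > c from by omega, show ¬((50:Int) ≤ c) from by omega] <;> try rfl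
  · simp [bsLoop, hK, hS, hF, hC, PySem.List.slice, PySem.List.clampIdx, show ¬((5:Int) > c) from by omega, show (5:Int) ≤ c from by omega, show ¬((10:Int) > c) from by omega, show (10:Int) ≤ c from by omega, show ¬((15:Int) > c) from by omega, show (15:Int) ≤ c from by omega, show ¬((20:Int) > c) from by omega, show (20:Int) ≤ c from by omega, show ¬((25:Int) > c) from by omega, show (25:Int) ≤ c from by omega, show ¬((30:Int) > c) from by omega, show (30:Int) ≤ c from by omega, show ¬((35:Int) > c) from by omega, show (35:Int) ≤ c from by omega, show ¬((40:Int) > c) from by omega, show (40:Int) ≤ c from by omega, show ¬((45:Int) > c) from by omega, show (45:Int) ≤ c from by omega, show ¬((50:Int) > c) from by omega, show (50:Int) ≤ c from by omega] <;> try rfl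

-- ===== VERDICT (by name: the statement is the Claim_ definition above) =====
theorem get_warrior_abilities_for_circle_spec : Claim_equal_get_warrior_abilities_for_circle := by
  intro circle _
  unfold Spec_get_warrior_abilities_for_circle
  unfold get_warrior_abilities_for_circle get_warrior_abilities_for_circle_alt
  exact core _
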